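-- pv_equiv track=rewrite | github.com/md-ward/my-Kata-solutions- | Odd-Even String Sort.py | sort_my_string
-- ===== SOURCE A (Python) =====
-- def sort_my_string(s):
--
--
--     temp=enumerate(s)
--     odd=''
--     even=''
--     for i ,j in temp:
--         if i==0 or i%2==0:
--             even+=j
--         else: odd+=j
--     return '{} {}'.format(even,odd)
-- ===== SOURCE B (Python) =====
-- def sort_my_string(s):
--     even = []
--     odd = []
--     it = iter(s)
--     for c in it:
--         even.append(c)
--         nxt = next(it, None)
--         if nxt is not None:
--             odd.append(nxt)
--     return '{} {}'.format(''.join(even), ''.join(odd))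
-- ===== Notes on version B (the rewrite author's own statement) =====
-- stated objective: alternative
-- what changed: Replaces the enumerate loop with a per-index parity test and string += accumulators by an iterator-pairing loop that consumes the string two characters at a time into lists joined once, so no index is ever computed or tested.
import Mathlib
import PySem

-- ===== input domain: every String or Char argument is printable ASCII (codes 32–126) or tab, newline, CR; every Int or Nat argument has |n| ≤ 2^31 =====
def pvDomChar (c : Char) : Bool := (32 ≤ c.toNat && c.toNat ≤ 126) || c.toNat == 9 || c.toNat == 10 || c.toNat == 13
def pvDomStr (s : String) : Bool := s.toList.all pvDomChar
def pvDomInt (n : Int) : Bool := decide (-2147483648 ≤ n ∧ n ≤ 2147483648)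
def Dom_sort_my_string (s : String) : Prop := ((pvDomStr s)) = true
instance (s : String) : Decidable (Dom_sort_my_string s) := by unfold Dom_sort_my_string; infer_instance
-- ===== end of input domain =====

-- B replaces A's enumerate loop with its parity test by an iterator-pairing loop consuming two characters per step (alternative decomposition; same result).

-- ===== PORT A =====
-- for i, j in enumerate(s): if i==0 or i%2==0: even += j else: odd += j
-- state is (odd, even), exactly the two Python string accumulators (as char lists)
def sort_my_string (s : String) : String :=
  let r := (PySem.List.enumerate s.toList 0).foldl
    (fun (acc : List Char × List Char) (ij : Int × Char) =>
      if ij.1 == 0 || PySem.Int.mod ij.1 2 == 0 then (acc.1, acc.2 ++ [ij.2])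
      else (acc.1 ++ [ij.2], acc.2))
    ([], [])
  -- '{} {}'.format(even, odd)
  String.ofList (r.2 ++ ' ' :: r.1)

-- ===== PORT B =====
-- the for-loop over iter(s): each iteration appends c to even and, if present, next(it) to odd
def pvPairLoop (ev od cs : List Char) : List Char × List Char :=
  match cs with
  | [] => (ev, od)
  | [a] => (ev ++ [a], od)
  | a :: b :: t => pvPairLoop (ev ++ [a]) (od ++ [b]) t

def sort_my_string_alt (s : String) : String :=
  let p := pvPairLoop [] [] s.toList
  String.ofList (p.1 ++ ' ' :: p.2)

-- ===== PRECONDITION & SPEC =====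
def Spec_sort_my_string (s : String) (out : String) : Prop := out = sort_my_string_alt s
instance (s : String) (out : String) : Decidable (Spec_sort_my_string s out) := by unfold Spec_sort_my_string; infer_instance

-- ===== CLAIM (what is proved, stated in full; the proofs are below) =====
def Claim_equal_sort_my_string : Prop := ∀ (s : String), Dom_sort_my_string s → Spec_sort_my_string s (sort_my_string s)

-- ===== LEMMAS AND PROOFS =====

lemma pvFold_eq_pairLoop : ∀ (cs : List Char) (k : Nat) (od ev : List Char),
    (PySem.List.enumerate cs (2 * (k : Int))).foldl
      (fun (acc : List Char × List Char) (ij : Int × Char) =>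
        if ij.1 == 0 || PySem.Int.mod ij.1 2 == 0 then (acc.1, acc.2 ++ [ij.2])
        else (acc.1 ++ [ij.2], acc.2))
      (od, ev)
    = ((pvPairLoop ev od cs).2, (pvPairLoop ev od cs).1)
  | [], k, od, ev => by simp [PySem.List.enumerate_nil, pvPairLoop]
  | [a], k, od, ev => by
    simp [PySem.List.enumerate_cons, PySem.List.enumerate_nil, pvPairLoop]
  | a :: b :: t, k, od, ev => by
    have ih := pvFold_eq_pairLoop t (k + 1)
    have hmod : PySem.Int.mod (2 * (k : Int)) 2 = 0 :=
      (PySem.Int.mod_eq_zero_iff_dvd _ _).mpr ⟨(k : Int), by ring⟩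
    have hmod1 : PySem.Int.mod (2 * (k : Int) + 1) 2 = 1 := by
      rw [show (2 * (k : Int) + 1) = ((2 * k + 1 : Nat) : Int) by push_cast; ring,
        show (2 : Int) = ((2 : Nat) : Int) by norm_num, PySem.Int.mod_natCast]
      norm_num [Nat.add_mod, Nat.mul_mod_right]
    have hstep : (2 * (k : Int) + 1 + 1) = 2 * ((k + 1 : Nat) : Int) := by push_cast; ring
    rw [PySem.List.enumerate_cons, PySem.List.enumerate_cons, List.foldl_cons, List.foldl_cons,
      hstep]
    simp only [hmod, hmod1]
    norm_num
    simpa [pvPairLoop] using ih (od ++ [b]) (ev ++ [a])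

-- ===== VERDICT (by name: the statement is the Claim_ definition above) =====
theorem sort_my_string_spec : Claim_equal_sort_my_string := by
  intro s _
  have h := pvFold_eq_pairLoop s.toList 0 [] []
  simp only [Nat.cast_zero, mul_zero] at h
  simp only [Spec_sort_my_string, sort_my_string, sort_my_string_alt]
  rw [h]
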